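-- pv_equiv track=rewrite | github.com/asyncViridian/adventofcode | 2020/day20.py | validate_fulltiling
-- ===== SOURCE A (Python) =====
-- def validate_fulltiling(fulltiling):
--     def check_adjacent(c0, c1):
--         if (c0,c1) not in fulltiling:
--             return True
--         if fulltiling[(c0,c1)] is None:
--             return True
--         # check top edge
--         if (c0-1,c1) in fulltiling and fulltiling[(c0-1,c1)] is not None:
--             if fulltiling[(c0,c1)][0]!=fulltiling[(c0-1,c1)][-1]:
--                 return False
--         # check right edge
--         if (c0,c1+1) in fulltiling and fulltiling[(c0,c1+1)] is not None:
--             if ''.join([e[-1] for e in fulltiling[(c0,c1)]])!=''.join([e[0] for e in fulltiling[c0,c1+1]]):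
--                 return False
--         # check bottom edge
--         if (c0+1,c1) in fulltiling and fulltiling[(c0+1,c1)] is not None:
--             if fulltiling[(c0,c1)][-1]!=fulltiling[(c0+1,c1)][0]:
--                 return False
--         # check left edge
--         if (c0,c1-1) in fulltiling and fulltiling[(c0,c1-1)] is not None:
--             if ''.join([e[0] for e in fulltiling[(c0,c1)]])!=''.join([e[-1] for e in fulltiling[c0,c1-1]]):
--                 return False
--         return True
--     return all([check_adjacent(i,j) for i,j in fulltiling])
-- ===== SOURCE B (Python) =====
-- def validate_fulltiling(fulltiling):
--     # Publish each placed tile's four edge signatures under a border-line key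
--     # (('H', c0, c1) = horizontal border above cell (c0, c1); ('V', c0, c1) =
--     # vertical border left of it).  Two tiles are adjacent iff they publish the
--     # same key, so the tiling is valid iff no key receives two different values.
--     borders = {}
--     for (c0, c1), cell in fulltiling.items():
--         if cell is None:
--             continue
--         for key, val in ((('H', c0, c1), cell[:1]),
--                          (('H', c0 + 1, c1), cell[-1:]),
--                          (('V', c0, c1), [''.join(e[:1] for e in cell)]),
--                          (('V', c0, c1 + 1), [''.join(e[-1:] for e in cell)])):
--             if borders.get(key, val) != val:
--                 return False
--             borders[key] = val
--     return True
-- ===== Notes on version B (the rewrite author's own statement) =====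
-- stated objective: alternative
-- what changed: B replaces A's per-cell four-neighbour dict lookups by a border-signature index: each placed tile publishes its four edge values (first/last row, joined first/last columns, taken with total slices) under a key naming the grid border line, and the tiling is valid iff no border key ever receives two different values, so neighbour lookups disappear entirely.
import Mathlib
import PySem

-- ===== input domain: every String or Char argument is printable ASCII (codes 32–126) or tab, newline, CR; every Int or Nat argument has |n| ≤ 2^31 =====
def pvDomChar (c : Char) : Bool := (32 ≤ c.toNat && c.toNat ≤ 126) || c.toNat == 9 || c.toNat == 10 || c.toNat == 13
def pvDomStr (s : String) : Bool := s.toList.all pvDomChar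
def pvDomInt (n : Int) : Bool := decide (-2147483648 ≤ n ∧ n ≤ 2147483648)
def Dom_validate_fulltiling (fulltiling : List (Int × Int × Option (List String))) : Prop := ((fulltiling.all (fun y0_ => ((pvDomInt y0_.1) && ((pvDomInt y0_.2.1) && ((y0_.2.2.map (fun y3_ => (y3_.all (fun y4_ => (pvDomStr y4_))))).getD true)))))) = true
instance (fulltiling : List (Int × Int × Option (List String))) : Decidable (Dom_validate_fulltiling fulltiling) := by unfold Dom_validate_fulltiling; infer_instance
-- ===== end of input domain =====

-- B checks each shared edge once through a border-signature index (each placed tile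
-- publishes its four edge values under a border-line key; valid iff no key receives two
-- different values) instead of A's per-key four-neighbour lookups; objective: alternative.


-- ===== PORT A =====
-- dict membership + lookup: first entry with key (c0, c1), its value (none = key absent)
def pvLookup (d : List (Int × Int × Option (List String))) (c0 c1 : Int) :
    Option (Option (List String)) :=
  (List.find? (fun e => e.1 == c0 && e.2.1 == c1) d).map (fun e => e.2.2)

-- ''.join([e[-1] for e in cell])  (e[-1] is a one-char string; getD "" never hit inside Pre_)
def pvJoinLast (cell : List String) : String :=
  PySem.Str.join "" (cell.map (fun e => ((PySem.Str.pyGet? e (-1)).map (String.ofList [·])).getD ""))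

-- ''.join([e[0] for e in cell])
def pvJoinFirst (cell : List String) : String :=
  PySem.Str.join "" (cell.map (fun e => ((PySem.Str.pyGet? e 0).map (String.ofList [·])).getD ""))

-- check_adjacent(c0, c1): early 'return False' on a mismatch = conjunction of the four edge checks
def check_adjacent (d : List (Int × Int × Option (List String))) (c0 c1 : Int) : Bool :=
  match pvLookup d c0 c1 with
  | none => true            -- (c0,c1) not in fulltiling
  | some none => true       -- fulltiling[(c0,c1)] is None
  | some (some cell) =>
      (match pvLookup d (c0 - 1) c1 with
       | some (some up) => PySem.List.pyGet? cell 0 == PySem.List.pyGet? up (-1)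
       | _ => true) &&
      ((match pvLookup d c0 (c1 + 1) with
       | some (some rt) => pvJoinLast cell == pvJoinFirst rt
       | _ => true) &&
      ((match pvLookup d (c0 + 1) c1 with
       | some (some dn) => PySem.List.pyGet? cell (-1) == PySem.List.pyGet? dn 0
       | _ => true) &&
      (match pvLookup d c0 (c1 - 1) with
       | some (some lf) => pvJoinFirst cell == pvJoinLast lf
       | _ => true)))

def validate_fulltiling (fulltiling : List (Int × Int × Option (List String))) : Bool :=
  (fulltiling.map (fun e => check_adjacent fulltiling e.1 e.2.1)).all id

-- ===== PORT B =====
-- ''.join(e[:1] for e in cell)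
def pvJoinFirstB (cell : List String) : String :=
  PySem.Str.join "" (cell.map (fun e => PySem.Str.slice e none (some 1)))

-- ''.join(e[-1:] for e in cell)
def pvJoinLastB (cell : List String) : String :=
  PySem.Str.join "" (cell.map (fun e => PySem.Str.slice e (some (-1)) none))

-- the four (border-line key, edge value) pairs a placed cell publishes;
-- true = 'H' (border above row c0), false = 'V' (border left of column c1)
def pvEdges (c0 c1 : Int) (cell : List String) : List ((Bool × Int × Int) × List String) :=
  [((true, c0, c1), PySem.List.slice cell none (some 1)),
   ((true, c0 + 1, c1), PySem.List.slice cell (some (-1)) none),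
   ((false, c0, c1), [pvJoinFirstB cell]),
   ((false, c0, c1 + 1), [pvJoinLastB cell])]

-- the inner for-loop: 'if borders.get(key, val) != val: return False; borders[key] = val'
def pvAddEdges (borders : PySem.Dict (Bool × Int × Int) (List String)) :
    List ((Bool × Int × Int) × List String) → Option (PySem.Dict (Bool × Int × Int) (List String))
  | [] => some borders
  | (k, v) :: rest =>
      if borders.getD k v ≠ v then none
      else pvAddEdges (borders.insert k v) rest

-- the outer for-loop over the items, early 'return False'
def pvBLoop (borders : PySem.Dict (Bool × Int × Int) (List String)) :
    List (Int × Int × Option (List String)) → Bool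
  | [] => true
  | e :: rest =>
      match e.2.2 with
      | none => pvBLoop borders rest
      | some cell =>
          match pvAddEdges borders (pvEdges e.1 e.2.1 cell) with
          | none => false
          | some b' => pvBLoop b' rest

def validate_fulltiling_alt (fulltiling : List (Int × Int × Option (List String))) : Bool :=
  pvBLoop PySem.Dict.empty fulltiling

-- ===== PRECONDITION & SPEC =====
-- Pre_ excludes (a) association lists with duplicate keys, which do not represent a Python
-- dict, and (b) tilings where two ADJACENT placed tiles involve an empty tile (vertical
-- adjacency) or an empty row (horizontal adjacency): on those A's indexing/joins raise
-- IndexError, except when an earlier edge check already returned False before the raising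
-- access (then A returns False, as does B).
def Pre_validate_fulltiling (fulltiling : List (Int × Int × Option (List String))) : Prop :=
  (fulltiling.map (fun e => (e.1, e.2.1))).Nodup ∧
  ∀ e ∈ fulltiling, ∀ e' ∈ fulltiling, ∀ cell ∈ e.2.2, ∀ cell' ∈ e'.2.2,
    (e.1 = e'.1 + 1 ∧ e.2.1 = e'.2.1 → cell ≠ [] ∧ cell' ≠ []) ∧
    (e.1 = e'.1 ∧ e.2.1 = e'.2.1 + 1 →
      (∀ r ∈ cell, r.toList ≠ []) ∧ (∀ r ∈ cell', r.toList ≠ []))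
instance (fulltiling : List (Int × Int × Option (List String))) : Decidable (Pre_validate_fulltiling fulltiling) := by unfold Pre_validate_fulltiling; infer_instance

def pvWitness_validate_fulltiling : (List (Int × Int × Option (List String))) :=
  [(0, 0, some ["ab", "cd"]), (0, 1, some ["bb", "dd"]), (1, 1, none)]

def Spec_validate_fulltiling (fulltiling : List (Int × Int × Option (List String))) (out : Bool) : Prop := out = validate_fulltiling_alt fulltiling
instance (fulltiling : List (Int × Int × Option (List String))) (out : Bool) : Decidable (Spec_validate_fulltiling fulltiling out) := by unfold Spec_validate_fulltiling; infer_instance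

-- ===== CLAIM (what is proved, stated in full; the proofs are below) =====
def Claim_equal_validate_fulltiling : Prop := ∀ (fulltiling : List (Int × Int × Option (List String))), Dom_validate_fulltiling fulltiling → Pre_validate_fulltiling fulltiling → Spec_validate_fulltiling fulltiling (validate_fulltiling fulltiling)

-- ===== LEMMAS AND PROOFS =====

-- proof-side restatement of unique keys (Pre_'s first conjunct implies it)
def pvKeysNodup : List (Int × Int × Option (List String)) → Bool
  | [] => true
  | e :: rest =>
      rest.all (fun e' => !(e'.1 == e.1 && e'.2.1 == e.2.1)) && pvKeysNodup rest

lemma pvKeysNodup_of_nodup {d : List (Int × Int × Option (List String))}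
    (h : (d.map (fun e => (e.1, e.2.1))).Nodup) : pvKeysNodup d = true := by
  induction d with
  | nil => rfl
  | cons a rest ih =>
      rw [List.map_cons, List.nodup_cons] at h
      simp only [pvKeysNodup, Bool.and_eq_true, List.all_eq_true]
      refine ⟨?_, ih h.2⟩
      intro e' he'
      simp only [Bool.not_eq_eq_eq_not, Bool.not_true, Bool.and_eq_false_iff,
        beq_eq_false_iff_ne, ne_eq]
      by_contra hcon
      push Not at hcon
      exact h.1 (by rw [← hcon.1, ← hcon.2]; exact List.mem_map_of_mem he')

-- all edges published by the placed cells of the tiling, in order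
def pvAllEdges (d : List (Int × Int × Option (List String))) :
    List ((Bool × Int × Int) × List String) :=
  d.flatMap (fun e => match e.2.2 with
    | none => []
    | some cell => pvEdges e.1 e.2.1 cell)

-- no key receives two different values
def pvConsistent (es : List ((Bool × Int × Int) × List String)) : Prop :=
  ∀ p ∈ es, ∀ q ∈ es, p.1 = q.1 → p.2 = q.2

-- adjacency constraints stated directly on pairs of entries (in B's edge values)
def pvGood (d : List (Int × Int × Option (List String))) : Prop :=
  ∀ e ∈ d, ∀ e' ∈ d, ∀ cell cell', e.2.2 = some cell → e'.2.2 = some cell' →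
    ((e.1 = e'.1 + 1 ∧ e.2.1 = e'.2.1 →
        PySem.List.slice cell none (some 1) = PySem.List.slice cell' (some (-1)) none) ∧
     (e.1 = e'.1 ∧ e.2.1 = e'.2.1 + 1 → pvJoinFirstB cell = pvJoinLastB cell'))

lemma pvAddEdges_append (b : PySem.Dict (Bool × Int × Int) (List String))
    (es fs : List ((Bool × Int × Int) × List String)) :
    pvAddEdges b (es ++ fs) = (pvAddEdges b es).bind (fun b' => pvAddEdges b' fs) := by
  induction es generalizing b with
  | nil => rfl
  | cons p rest ih =>
      obtain ⟨k, v⟩ := p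
      simp only [List.cons_append, pvAddEdges]
      split
      · rfl
      · exact ih _

lemma pvBLoop_eq (b : PySem.Dict (Bool × Int × Int) (List String))
    (l : List (Int × Int × Option (List String))) :
    pvBLoop b l = (pvAddEdges b (pvAllEdges l)).isSome := by
  induction l generalizing b with
  | nil => rfl
  | cons e rest ih =>
      rcases e with ⟨c0, c1, v⟩
      cases v with
      | none => simpa [pvBLoop, pvAllEdges] using ih b
      | some cell =>
          simp only [pvBLoop, pvAllEdges, List.flatMap_cons, pvAddEdges_append]
          cases h : pvAddEdges b (pvEdges c0 c1 cell) with
          | none => simp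
          | some b' => simpa [pvAllEdges] using ih b'

lemma pvAddEdges_isSome_iff (es : List ((Bool × Int × Int) × List String))
    (b : PySem.Dict (Bool × Int × Int) (List String)) :
    (pvAddEdges b es).isSome = true ↔
      (pvConsistent es ∧ ∀ p ∈ es, ∀ v, b.get? p.1 = some v → v = p.2) := by
  induction es generalizing b with
  | nil => simp [pvAddEdges, pvConsistent]
  | cons h rest ih =>
      obtain ⟨k, v⟩ := h
      simp only [pvAddEdges]
      rw [PySem.Dict.getD_eq_get?_getD]
      cases hbk : b.get? k with
      | some w =>
          by_cases hwv : w = v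
          · subst hwv
            rw [Option.getD_some, if_neg (fun h => h rfl), ih]
            constructor
            · rintro ⟨hc, hins⟩
              refine ⟨?_, ?_⟩
              · intro p hp q hq hkq
                rcases List.mem_cons.mp hp with rfl | hp <;>
                  rcases List.mem_cons.mp hq with rfl | hq
                · rfl
                · exact hins q hq w (by rw [PySem.Dict.get?_insert, if_pos hkq.symm])
                · exact (hins p hp w (by rw [PySem.Dict.get?_insert, if_pos hkq])).symm
                · exact hc p hp q hq hkq
              · intro p hp u hu
                rcases List.mem_cons.mp hp with rfl | hp
                · rw [hbk] at hu; exact (Option.some.inj hu).symm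
                · by_cases hpk : p.1 = k
                  · have h1 : u = w := by rw [hpk, hbk] at hu; exact (Option.some.inj hu).symm
                    exact h1.trans (hins p hp w (by rw [PySem.Dict.get?_insert, if_pos hpk]))
                  · exact hins p hp u (by rwa [PySem.Dict.get?_insert, if_neg hpk])
            · rintro ⟨hc, hb⟩
              refine ⟨fun p hp q hq hkq => hc p (by simp [hp]) q (by simp [hq]) hkq, ?_⟩
              intro p hp u hu
              rw [PySem.Dict.get?_insert] at hu
              by_cases hpk : p.1 = k
              · rw [if_pos hpk] at hu
                have huv : u = w := (Option.some.inj hu).symm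
                exact huv.trans (hc (k, w) List.mem_cons_self p (by simp [hp]) hpk.symm)
              · rw [if_neg hpk] at hu
                exact hb p (by simp [hp]) u hu
          · rw [Option.getD_some, if_pos hwv]
            simp only [Option.isSome_none, Bool.false_eq_true, false_iff, not_and]
            intro _ hb
            exact hwv (hb (k, v) List.mem_cons_self w hbk)
      | none =>
          rw [Option.getD_none, if_neg (fun h => h rfl), ih]
          constructor
          · rintro ⟨hc, hins⟩
            refine ⟨?_, ?_⟩
            · intro p hp q hq hkq
              rcases List.mem_cons.mp hp with rfl | hp <;>
                rcases List.mem_cons.mp hq with rfl | hq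
              · rfl
              · exact hins q hq v (by rw [PySem.Dict.get?_insert, if_pos hkq.symm])
              · exact (hins p hp v (by rw [PySem.Dict.get?_insert, if_pos hkq])).symm
              · exact hc p hp q hq hkq
            · intro p hp u hu
              rcases List.mem_cons.mp hp with rfl | hp
              · rw [hbk] at hu; cases hu
              · by_cases hpk : p.1 = k
                · rw [hpk, hbk] at hu; cases hu
                · exact hins p hp u (by rwa [PySem.Dict.get?_insert, if_neg hpk])
          · rintro ⟨hc, hb⟩
            refine ⟨fun p hp q hq hkq => hc p (by simp [hp]) q (by simp [hq]) hkq, ?_⟩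
            intro p hp u hu
            rw [PySem.Dict.get?_insert] at hu
            by_cases hpk : p.1 = k
            · rw [if_pos hpk] at hu
              have huv : u = v := (Option.some.inj hu).symm
              exact huv.trans (hc (k, v) List.mem_cons_self p (by simp [hp]) hpk.symm)
            · rw [if_neg hpk] at hu
              exact hb p (by simp [hp]) u hu

lemma alt_true_iff (d : List (Int × Int × Option (List String))) :
    validate_fulltiling_alt d = true ↔ pvConsistent (pvAllEdges d) := by
  unfold validate_fulltiling_alt
  rw [pvBLoop_eq, pvAddEdges_isSome_iff]
  simp [PySem.Dict.get?_empty]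

lemma mem_allEdges {d : List (Int × Int × Option (List String))}
    {p : (Bool × Int × Int) × List String} :
    p ∈ pvAllEdges d ↔ ∃ e ∈ d, ∃ cell, e.2.2 = some cell ∧ p ∈ pvEdges e.1 e.2.1 cell := by
  unfold pvAllEdges
  rw [List.mem_flatMap]
  constructor
  · rintro ⟨e, he, hp⟩
    cases hv : e.2.2 with
    | none => rw [hv] at hp; cases hp
    | some cell => rw [hv] at hp; exact ⟨e, he, cell, hv, hp⟩
  · rintro ⟨e, he, cell, hv, hp⟩
    exact ⟨e, he, by rw [hv]; exact hp⟩

-- nodup keys: two members with the same key are the same entry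
lemma pvKey_unique {d : List (Int × Int × Option (List String))}
    (hnd : pvKeysNodup d = true)
    {e e' : Int × Int × Option (List String)} (he : e ∈ d) (he' : e' ∈ d)
    (h1 : e.1 = e'.1) (h2 : e.2.1 = e'.2.1) : e = e' := by
  induction d with
  | nil => cases he
  | cons a rest ih =>
      simp only [pvKeysNodup, Bool.and_eq_true, List.all_eq_true] at hnd
      rcases List.mem_cons.mp he with rfl | hm <;> rcases List.mem_cons.mp he' with rfl | hm'
      · rfl
      · have h := hnd.1 e' hm'
        rw [← h1, ← h2] at h
        simp at h
      · have h := hnd.1 e hm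
        rw [h1, h2] at h
        simp at h
      · exact ih hnd.2 hm hm'

lemma consistent_iff_good (d : List (Int × Int × Option (List String)))
    (hnd : pvKeysNodup d = true) :
    pvConsistent (pvAllEdges d) ↔ pvGood d := by
  constructor
  · intro hc e he e' he' cell cell' hv hv'
    refine ⟨?_, ?_⟩
    · rintro ⟨h1, h2⟩
      exact hc ((true, e.1, e.2.1), PySem.List.slice cell none (some 1))
        (mem_allEdges.mpr ⟨e, he, cell, hv, by simp [pvEdges]⟩)
        ((true, e'.1 + 1, e'.2.1), PySem.List.slice cell' (some (-1)) none)
        (mem_allEdges.mpr ⟨e', he', cell', hv', by simp [pvEdges]⟩)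
        (by simp [h1, h2])
    · rintro ⟨h1, h2⟩
      have := hc ((false, e.1, e.2.1), [pvJoinFirstB cell])
        (mem_allEdges.mpr ⟨e, he, cell, hv, by simp [pvEdges]⟩)
        ((false, e'.1, e'.2.1 + 1), [pvJoinLastB cell'])
        (mem_allEdges.mpr ⟨e', he', cell', hv', by simp [pvEdges]⟩)
        (by simp [h1, h2])
      simpa using this
  · intro hg p hp q hq hkq
    rcases mem_allEdges.mp hp with ⟨e, he, cell, hv, hpe⟩
    rcases mem_allEdges.mp hq with ⟨e', he', cell', hv', hqe⟩
    have hsame : e.1 = e'.1 → e.2.1 = e'.2.1 → cell = cell' := by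
      intro h1 h2
      have h3 := pvKey_unique hnd he he' h1 h2
      rw [h3] at hv
      exact (Option.some.inj (hv'.symm.trans hv)).symm
    simp only [pvEdges, List.mem_cons, List.not_mem_nil, or_false] at hpe hqe
    rcases hpe with rfl | rfl | rfl | rfl <;> rcases hqe with rfl | rfl | rfl | rfl <;>
      simp only [Prod.mk.injEq] at hkq ⊢
    · rw [hsame hkq.2.1 hkq.2.2]
    · exact (hg e he e' he' cell cell' hv hv').1 ⟨hkq.2.1, hkq.2.2⟩
    · exact absurd hkq.1 (by simp)
    · exact absurd hkq.1 (by simp)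
    · exact ((hg e' he' e he cell' cell hv' hv).1 ⟨hkq.2.1.symm, hkq.2.2.symm⟩).symm
    · rw [hsame (by have := hkq.2.1; omega) hkq.2.2]
    · exact absurd hkq.1 (by simp)
    · exact absurd hkq.1 (by simp)
    · exact absurd hkq.1 (by simp)
    · exact absurd hkq.1 (by simp)
    · rw [hsame hkq.2.1 hkq.2.2]
    · rw [(hg e he e' he' cell cell' hv hv').2 ⟨hkq.2.1, hkq.2.2⟩]
    · exact absurd hkq.1 (by simp)
    · exact absurd hkq.1 (by simp)
    · rw [(hg e' he' e he cell' cell hv' hv).2 ⟨hkq.2.1.symm, hkq.2.2.symm⟩]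
    · rw [hsame hkq.2.1 (by have := hkq.2.1; have := hkq.2.2; omega)]

-- ===== bridges: A's indexing expressions equal B's slice expressions, on every input =====
lemma pvRowFirst_eq (r : String) :
    ((PySem.Str.pyGet? r 0).map (String.ofList [·])).getD "" = PySem.Str.slice r none (some 1) := by
  rw [← String.toList_inj]
  have hs : (PySem.Str.slice r none (some 1)).toList = r.toList.take 1 := by
    have h := PySem.List.slice_to (xs := r.toList) (b := 1) (by norm_num)
    rw [PySem.Str.toList_slice, PySem.Chars.slice_eq_listSlice, h]
    norm_num
  rw [hs]
  cases hr : r.toList with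
  | nil => simp [hr, PySem.List.pyGet?]
  | cons c cs => simp [hr, PySem.List.pyGet?, PySem.List.pyIdx?]

lemma pvRowLast_eq (r : String) :
    ((PySem.Str.pyGet? r (-1)).map (String.ofList [·])).getD "" = PySem.Str.slice r (some (-1)) none := by
  rw [← String.toList_inj]
  have hs : (PySem.Str.slice r (some (-1)) none).toList = r.toList.drop (r.toList.length - 1) := by
    rw [PySem.Str.toList_slice, PySem.Chars.slice_eq_listSlice, PySem.List.slice_from_neg_one]
  rw [hs]
  rcases List.eq_nil_or_concat r.toList with hr | ⟨zs, z, hr⟩ <;>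
    simp [hr, PySem.List.pyGet?_neg_one]

lemma pvJoinFirst_eq (cell : List String) : pvJoinFirst cell = pvJoinFirstB cell := by
  unfold pvJoinFirst pvJoinFirstB
  exact congrArg _ (List.map_congr_left (fun r _ => pvRowFirst_eq r))

lemma pvJoinLast_eq (cell : List String) : pvJoinLast cell = pvJoinLastB cell := by
  unfold pvJoinLast pvJoinLastB
  exact congrArg _ (List.map_congr_left (fun r _ => pvRowLast_eq r))

lemma pvHeadLast_iff (xs ys : List String) :
    PySem.List.pyGet? xs 0 = PySem.List.pyGet? ys (-1) ↔
      PySem.List.slice xs none (some 1) = PySem.List.slice ys (some (-1)) none := by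
  have h1 := PySem.List.slice_to (xs := xs) (b := 1) (by norm_num)
  rw [PySem.List.pyGet?_zero, PySem.List.pyGet?_neg_one, PySem.List.slice_from_neg_one, h1]
  norm_num
  rcases xs with _ | ⟨x, xs⟩ <;> rcases ys.eq_nil_or_concat with rfl | ⟨zs, z, rfl⟩ <;>
    simp [List.take_add_one]

-- ===== A-side characterisation =====
lemma pvLookup_mem {d : List (Int × Int × Option (List String))} {c0 c1 : Int}
    {v : Option (List String)} (h : pvLookup d c0 c1 = some v) :
    ∃ e ∈ d, e.1 = c0 ∧ e.2.1 = c1 ∧ e.2.2 = v := by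
  unfold pvLookup at h
  rcases Option.map_eq_some_iff.mp h with ⟨e, hf, hv⟩
  have hm := List.mem_of_find?_eq_some hf
  have hp := List.find?_some hf
  simp only [Bool.and_eq_true, beq_iff_eq] at hp
  exact ⟨e, hm, hp.1, hp.2, hv⟩

lemma pvLookup_self {d : List (Int × Int × Option (List String))}
    (hnd : pvKeysNodup d = true)
    {e : Int × Int × Option (List String)} (he : e ∈ d) :
    pvLookup d e.1 e.2.1 = some e.2.2 := by
  induction d with
  | nil => cases he
  | cons a rest ih =>
      simp only [pvKeysNodup, Bool.and_eq_true, List.all_eq_true] at hnd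
      rcases List.mem_cons.mp he with rfl | hmem
      · simp [pvLookup]
      · have hne : ¬ (a.1 == e.1 && a.2.1 == e.2.1) = true := by
          simp only [Bool.and_eq_true, beq_iff_eq]
          rintro ⟨h1, h2⟩
          have := hnd.1 e hmem
          simp [h1, h2] at this
        have := ih hnd.2 hmem
        unfold pvLookup at this ⊢
        rw [List.find?_cons_of_neg (by simpa using hne)]
        exact this

lemma a_true_iff_good (d : List (Int × Int × Option (List String)))
    (hnd : pvKeysNodup d = true) :
    validate_fulltiling d = true ↔ pvGood d := by
  unfold validate_fulltiling
  simp only [List.all_map, List.all_eq_true, Function.comp, id]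
  constructor
  · -- A's checks imply Good
    intro h e he e' he' cell cell' hv hv'
    constructor
    · rintro ⟨h1, h2⟩
      have hc := h e he
      unfold check_adjacent at hc
      rw [pvLookup_self hnd he, hv] at hc
      have hup : pvLookup d (e.1 - 1) e.2.1 = some (some cell') := by
        have hl := pvLookup_self hnd he'
        rw [hv'] at hl
        rw [show e.1 - 1 = e'.1 by omega, h2]
        exact hl
      rw [hup] at hc
      simp only [Bool.and_eq_true, beq_iff_eq] at hc
      exact (pvHeadLast_iff cell cell').mp hc.1
    · rintro ⟨h1, h2⟩
      have hc := h e he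
      unfold check_adjacent at hc
      rw [pvLookup_self hnd he, hv] at hc
      have hlf : pvLookup d e.1 (e.2.1 - 1) = some (some cell') := by
        have hl := pvLookup_self hnd he'
        rw [hv'] at hl
        rw [h1, show e.2.1 - 1 = e'.2.1 by omega]
        exact hl
      rw [hlf] at hc
      simp only [Bool.and_eq_true, beq_iff_eq] at hc
      have := hc.2.2.2
      rwa [pvJoinFirst_eq, pvJoinLast_eq] at this
  · -- Good implies A's checks
    intro hg e he
    unfold check_adjacent
    rw [pvLookup_self hnd he]
    cases hv : e.2.2 with
    | none => rfl
    | some cell =>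
        simp only [Bool.and_eq_true]
        refine ⟨?_, ?_, ?_, ?_⟩
        · cases hup : pvLookup d (e.1 - 1) e.2.1 with
          | none => rfl
          | some uv =>
              cases uv with
              | none => rfl
              | some up =>
                  rcases pvLookup_mem hup with ⟨e', he', h1, h2, h3⟩
                  have hb : (PySem.List.pyGet? cell 0 == PySem.List.pyGet? up (-1)) = true := by
                    rw [beq_iff_eq]
                    exact (pvHeadLast_iff cell up).mpr
                      ((hg e he e' he' cell up hv h3).1 ⟨by omega, h2.symm⟩)
                  exact hb
        · cases hrt : pvLookup d e.1 (e.2.1 + 1) with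
          | none => rfl
          | some rv =>
              cases rv with
              | none => rfl
              | some rt =>
                  rcases pvLookup_mem hrt with ⟨e', he', h1, h2, h3⟩
                  have hb : (pvJoinLast cell == pvJoinFirst rt) = true := by
                    rw [beq_iff_eq, pvJoinFirst_eq, pvJoinLast_eq]
                    exact ((hg e' he' e he rt cell h3 hv).2 ⟨h1, by omega⟩).symm
                  exact hb
        · cases hdn : pvLookup d (e.1 + 1) e.2.1 with
          | none => rfl
          | some dv =>
              cases dv with
              | none => rfl
              | some dn =>
                  rcases pvLookup_mem hdn with ⟨e', he', h1, h2, h3⟩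
                  have hb : (PySem.List.pyGet? cell (-1) == PySem.List.pyGet? dn 0) = true := by
                    rw [beq_iff_eq]
                    exact ((pvHeadLast_iff dn cell).mpr
                      ((hg e' he' e he dn cell h3 hv).1 ⟨by omega, h2⟩)).symm
                  exact hb
        · cases hlf : pvLookup d e.1 (e.2.1 - 1) with
          | none => rfl
          | some lv =>
              cases lv with
              | none => rfl
              | some lf =>
                  rcases pvLookup_mem hlf with ⟨e', he', h1, h2, h3⟩
                  have hb : (pvJoinFirst cell == pvJoinLast lf) = true := by
                    rw [beq_iff_eq, pvJoinFirst_eq, pvJoinLast_eq]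
                    exact (hg e he e' he' cell lf hv h3).2 ⟨h1.symm, by omega⟩
                  exact hb

-- ===== VERDICT (by name: the statement is the Claim_ definition above) =====
theorem validate_fulltiling_spec : Claim_equal_validate_fulltiling := by
  intro d _ hpre
  unfold Spec_validate_fulltiling
  have hnd := pvKeysNodup_of_nodup hpre.1
  rw [Bool.eq_iff_iff, a_true_iff_good d hnd, alt_true_iff, consistent_iff_good d hnd]
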